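-- pv_equiv track=rewrite | github.com/kirillezh/misticbot | function.py | searchurl
-- ===== SOURCE A (Python) =====
-- def searchurl(text):
--     split_text = text.split()
--     for i in split_text:
--         if "http" in i:
--             link = i
--     try:
--         return link
--     except:
--         return ''
-- ===== SOURCE B (Python) =====
-- def searchurl(text):
--     for tok in reversed(text.split()):
--         if "http" in tok:
--             return tok
--     return ''
-- ===== Notes on version B (the rewrite author's own statement) =====
-- stated objective: simpler
-- what changed: Reverse scan over the tokens with an early return on the first match, replacing A's forward scan that keeps overwriting a variable and its try/except on the possibly-undefined name.
import Mathlib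
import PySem

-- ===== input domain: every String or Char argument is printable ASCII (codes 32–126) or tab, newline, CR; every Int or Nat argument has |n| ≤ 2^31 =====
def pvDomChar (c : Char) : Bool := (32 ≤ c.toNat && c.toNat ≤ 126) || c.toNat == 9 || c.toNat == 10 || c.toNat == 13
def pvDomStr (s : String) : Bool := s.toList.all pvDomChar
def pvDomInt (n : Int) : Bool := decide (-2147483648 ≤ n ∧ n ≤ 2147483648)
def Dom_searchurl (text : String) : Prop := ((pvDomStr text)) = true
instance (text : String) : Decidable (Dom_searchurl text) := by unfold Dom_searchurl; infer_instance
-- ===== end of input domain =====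

-- B replaces A's forward scan-and-overwrite plus try/except with a reverse scan that
-- returns the first matching token (objective: simpler).

-- ===== PORT A =====
-- A: forward loop keeping the last token containing "http" in 'link' (Option = possibly unbound),
-- then try/except: the value if bound, else ''.
def searchurl (text : String) : String :=
  let split_text := PySem.Str.split₀ text
  let link := split_text.foldl
    (fun (acc : Option String) (i : String) =>
      if PySem.Str.isIn "http" i then some i else acc) none
  match link with
  | some l => l
  | none => ""

-- ===== PORT B =====
-- B: scan the reversed token list, return the first token containing "http", else "".
def findHttpRev : List String → String
  | [] => ""
  | tok :: rest => if PySem.Str.isIn "http" tok then tok else findHttpRev rest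

def searchurl_alt (text : String) : String :=
  findHttpRev (PySem.Str.split₀ text).reverse

-- ===== PRECONDITION & SPEC =====
def Spec_searchurl (text : String) (out : String) : Prop := out = searchurl_alt text
instance (text : String) (out : String) : Decidable (Spec_searchurl text out) := by unfold Spec_searchurl; infer_instance

-- ===== CLAIM (what is proved, stated in full; the proofs are below) =====
def Claim_equal_searchurl : Prop := ∀ (text : String), Dom_searchurl text → Spec_searchurl text (searchurl text)

-- ===== LEMMAS AND PROOFS =====

theorem findHttpRev_eq_find? (ys : List String) :
    findHttpRev ys = ((ys.find? (fun t => PySem.Str.isIn "http" t)).getD "") := by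
  induction ys with
  | nil => rfl
  | cons t rest ih =>
      simp only [findHttpRev, List.find?]
      cases h : PySem.Chars.isIn ['h', 't', 't', 'p'] t.toList <;>
        simp [PySem.Str.isIn, h, ih]

theorem foldl_keepLast_eq (xs : List String) (acc : Option String) :
    xs.foldl (fun (a : Option String) (i : String) =>
        if PySem.Str.isIn "http" i then some i else a) acc
      = (xs.reverse.find? (fun t => PySem.Str.isIn "http" t)).or acc := by
  induction xs generalizing acc with
  | nil => rfl
  | cons t rest ih =>
      simp only [List.foldl_cons, List.reverse_cons, ih, List.find?_append]
      cases h : PySem.Chars.isIn ['h', 't', 't', 'p'] t.toList <;>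
        cases hf : rest.reverse.find? (fun t => PySem.Str.isIn "http" t) <;>
          simp [PySem.Str.isIn, h, hf, Option.or]

-- ===== VERDICT (by name: the statement is the Claim_ definition above) =====
theorem searchurl_spec : Claim_equal_searchurl := by
  intro text _
  unfold Spec_searchurl searchurl searchurl_alt
  simp only [foldl_keepLast_eq, findHttpRev_eq_find?]
  cases h : (PySem.Str.split₀ text).reverse.find? (fun t => PySem.Str.isIn "http" t) <;>
    simp [h, Option.or]
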